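-- pv_equiv track=rewrite | github.com/enriquetaso/cassidoos | 2023/289-repeatedGroups.py | repeatedGroups_two_pointers
-- ===== SOURCE A (Python) =====
-- def repeatedGroups_two_pointers(nums):
--     """Given a list of numbers, return all groups
--     of repeating consecutive numbers.
--
--     Time complexity: O(n)
--     Space complexity: O(n)
--     """
--     result = []
--     pointer_l = pointer_r = 0
--
--     while pointer_l < len(nums) - 1:
--         if nums[pointer_l] == nums[pointer_l + 1]:
--             aux = []
--             aux.append(nums[pointer_l])
--             pointer_r = pointer_l + 1
--             while nums[pointer_l] == nums[pointer_r]: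
--                 pointer_r += 1
--                 aux.append(nums[pointer_l])
--                 if pointer_r == len(nums):
--                     break
--             pointer_l = pointer_r
--             result.append(aux)
--         else:
--             pointer_l += 1
--     return result
-- ===== SOURCE B (Python) =====
-- def repeatedGroups_two_pointers(nums):
--     """Single value-driven pass: track the current run as (value, count)
--     and flush [value]*count when a run of length >= 2 ends."""
--     result = []
--     cur = None  # (value, count) of the open run
--     for x in nums:
--         if cur is not None and x == cur[0]:
--             cur = (cur[0], cur[1] + 1)
--         else:
--             if cur is not None and cur[1] >= 2:
--                 result.append([cur[0]] * cur[1])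
--             cur = (x, 1)
--     if cur is not None and cur[1] >= 2:
--         result.append([cur[0]] * cur[1])
--     return result
-- ===== Notes on version B (the rewrite author's own statement) =====
-- stated objective: simpler
-- what changed: Replaces A's index-based two-pointer outer/inner while loops with a single value-driven fold that keeps the open run as a (value,count) pair and emits [value]*count when a long run closes.
import Mathlib
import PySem

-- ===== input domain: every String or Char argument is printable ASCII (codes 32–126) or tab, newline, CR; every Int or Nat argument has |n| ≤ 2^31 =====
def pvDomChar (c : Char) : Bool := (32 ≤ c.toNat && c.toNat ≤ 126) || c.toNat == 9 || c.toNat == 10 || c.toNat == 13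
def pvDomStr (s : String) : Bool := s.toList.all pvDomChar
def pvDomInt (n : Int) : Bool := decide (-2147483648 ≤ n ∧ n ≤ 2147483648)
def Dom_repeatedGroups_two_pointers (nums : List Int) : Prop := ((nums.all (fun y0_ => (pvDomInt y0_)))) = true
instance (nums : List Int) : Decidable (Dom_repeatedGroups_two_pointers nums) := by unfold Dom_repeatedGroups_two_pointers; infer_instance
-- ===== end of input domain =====

-- B replaces A's index-based two-pointer loops with one value-driven fold over (value,count); objective: simpler.

-- ===== PORT A =====
-- inner while loop of A: r starts at pointer_l+1, appends v while nums[r] == v, breaks when r hits len.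
-- fuel (= nums.length at the call) only makes the loop structurally total; it never runs out on A's calls.
def pvInnerA (nums : List Int) (v : Int) : Nat → Nat → List Int → List Int × Nat
  | 0, r, aux => (aux, r)
  | fuel + 1, r, aux =>
    if h : r < nums.length then
      if nums[r] = v then
        if r + 1 = nums.length then (aux ++ [v], r + 1)
        else pvInnerA nums v fuel (r + 1) (aux ++ [v])
      else (aux, r)
    else (aux, r)

-- outer while loop of A over pointer_l (fuel = nums.length suffices: pointer_l strictly increases)
def pvOuterA (nums : List Int) : Nat → Nat → List (List Int) → List (List Int)
  | 0, _, result => result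
  | fuel + 1, l, result =>
    if h : l + 1 < nums.length then
      if nums[l] = nums[l + 1] then
        let p := pvInnerA nums nums[l] nums.length (l + 1) [nums[l]]
        pvOuterA nums fuel p.2 (result ++ [p.1])
      else pvOuterA nums fuel (l + 1) result
    else result

def repeatedGroups_two_pointers (nums : List Int) : List (List Int) :=
  pvOuterA nums nums.length 0 []

-- ===== PORT B =====
-- one fold step: extend the open run or flush it (if length ≥ 2) and open a new one
def pvStepB (st : List (List Int) × Option (Int × Int)) (x : Int) :
    List (List Int) × Option (Int × Int) :=
  match st.2 with
  | some (v, k) =>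
      if x = v then (st.1, some (v, k + 1))
      else ((if 2 ≤ k then st.1 ++ [List.replicate k.toNat v] else st.1), some (x, 1))
  | none => (st.1, some (x, 1))

def repeatedGroups_two_pointers_alt (nums : List Int) : List (List Int) :=
  let st := nums.foldl pvStepB ([], none)
  match st.2 with
  | some (v, k) => if 2 ≤ k then st.1 ++ [List.replicate k.toNat v] else st.1
  | none => st.1

-- ===== PRECONDITION & SPEC =====
def Spec_repeatedGroups_two_pointers (nums : List Int) (out : List (List Int)) : Prop := out = repeatedGroups_two_pointers_alt nums
instance (nums : List Int) (out : List (List Int)) : Decidable (Spec_repeatedGroups_two_pointers nums out) := by unfold Spec_repeatedGroups_two_pointers; infer_instance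

-- ===== CLAIM (what is proved, stated in full; the proofs are below) =====
def Claim_equal_repeatedGroups_two_pointers : Prop := ∀ (nums : List Int), Dom_repeatedGroups_two_pointers nums → Spec_repeatedGroups_two_pointers nums (repeatedGroups_two_pointers nums)

-- ===== LEMMAS AND PROOFS =====

-- length of the leading run of v
def pvLead (v : Int) : List Int → Nat
  | [] => 0
  | x :: xs => if x = v then pvLead v xs + 1 else 0

-- canonical result: for each maximal run of length ≥ 2 emit the run
def pvCanon : List Int → List (List Int)
  | [] => []
  | x :: xs =>
      if pvLead x xs = 0 then pvCanon xs
      else List.replicate (pvLead x xs + 1) x :: pvCanon (List.drop (pvLead x xs) xs)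
termination_by l => l.length
decreasing_by
  all_goals simp

theorem pvLead_nonpos (l : List Int) (h : l.length ≤ 1) : pvCanon l = [] := by
  match l with
  | [] => simp [pvCanon]
  | [x] => simp [pvCanon, pvLead]
  | x :: y :: t => simp at h

theorem pvLead_replicate_append (v x : Int) (k : Nat) (xs : List Int) (hx : x ≠ v) :
    pvLead v (List.replicate k v ++ x :: xs) = k := by
  induction k with
  | zero => simp [pvLead, hx]
  | succ n ih => simp [List.replicate_succ, pvLead, ih]

theorem pvLead_replicate (v : Int) (k : Nat) : pvLead v (List.replicate k v) = k := by
  induction k with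
  | zero => rfl
  | succ n ih => simp [List.replicate_succ, pvLead, ih]

theorem pvCanon_replicate (v : Int) (k : Nat) :
    pvCanon (List.replicate k v) = if 2 ≤ k then [List.replicate k v] else [] := by
  match k with
  | 0 => simp [pvCanon]
  | 1 => simp [pvCanon, pvLead]
  | (n + 2) =>
      rw [List.replicate_succ, pvCanon]
      rw [pvLead_replicate]
      simp [List.drop_replicate, List.replicate_succ, pvCanon]

theorem pvCanon_replicate_append (v x : Int) (k : Nat) (xs : List Int) (hx : x ≠ v) :
    pvCanon (List.replicate k v ++ x :: xs)
      = (if 2 ≤ k then [List.replicate k v] else []) ++ pvCanon (x :: xs) := by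
  match k with
  | 0 => simp
  | 1 => simp [pvCanon, pvLead, hx]
  | (n + 2) =>
      rw [List.replicate_succ, List.cons_append, pvCanon]
      rw [pvLead_replicate_append v x (n + 1) xs hx]
      have hd : List.drop (n + 1) (List.replicate (n + 1) v ++ x :: xs) = x :: xs := by
        rw [List.drop_append_of_le_length (by simp)]
        simp [List.drop_replicate]
      simp [List.replicate_succ]

theorem pvInnerA_spec (nums : List Int) (v : Int) :
    ∀ (fuel r : Nat) (aux : List Int), nums.length - r ≤ fuel →
      pvInnerA nums v fuel r aux
        = (aux ++ List.replicate (pvLead v (nums.drop r)) v, r + pvLead v (nums.drop r)) := by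
  intro fuel
  induction fuel with
  | zero =>
      intro r aux hf
      have hdrop : nums.drop r = [] := by apply List.drop_of_length_le; omega
      rw [pvInnerA, hdrop]
      simp [pvLead]
  | succ fuel ih =>
      intro r aux hf
      by_cases h : r < nums.length
      · have hd : nums.drop r = nums[r] :: nums.drop (r + 1) := List.drop_eq_getElem_cons h
        by_cases hv : nums[r] = v
        · by_cases hend : r + 1 = nums.length
          · have hd1 : nums.drop (r + 1) = [] := by apply List.drop_of_length_le; omega
            rw [pvInnerA, dif_pos h, if_pos hv, if_pos hend, hd, hv, hd1]
            simp [pvLead]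
          · have hstep : pvInnerA nums v (fuel + 1) r aux
                = pvInnerA nums v fuel (r + 1) (aux ++ [v]) := by
              rw [pvInnerA]
              rw [dif_pos h, if_pos hv, if_neg hend]
            rw [hstep, ih (r + 1) (aux ++ [v]) (by omega), hd, hv, Prod.mk.injEq]
            refine ⟨?_, ?_⟩
            · simp [pvLead, List.replicate_succ, List.append_assoc]
            · simp [pvLead]; omega
        · rw [pvInnerA, dif_pos h, if_neg hv, hd]
          simp [pvLead, hv]
      · have hdrop : nums.drop r = [] := by apply List.drop_of_length_le; omega
        rw [pvInnerA, dif_neg h, hdrop]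
        simp [pvLead]

theorem pvOuterA_spec (nums : List Int) :
    ∀ (fuel l : Nat) (res : List (List Int)), nums.length - l ≤ fuel →
      pvOuterA nums fuel l res = res ++ pvCanon (nums.drop l) := by
  intro fuel
  induction fuel with
  | zero =>
      intro l res hf
      have hd : nums.drop l = [] := by apply List.drop_of_length_le; omega
      simp [pvOuterA, hd, pvCanon]
  | succ fuel ih =>
      intro l res hf
      by_cases h : l + 1 < nums.length
      · have hd : nums.drop l = nums[l] :: nums.drop (l + 1) :=
          List.drop_eq_getElem_cons (by omega)
        have hd1 : nums.drop (l + 1) = nums[l + 1] :: nums.drop (l + 2) :=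
          List.drop_eq_getElem_cons h
        by_cases heq : nums[l] = nums[l + 1]
        · set m := pvLead nums[l] (nums.drop (l + 1)) with hm
          have hm1 : 1 ≤ m := by
            rw [hm, hd1, ← heq]
            simp [pvLead]
          have hp : pvInnerA nums nums[l] nums.length (l + 1) [nums[l]]
              = ([nums[l]] ++ List.replicate m nums[l], l + 1 + m) := by
            rw [pvInnerA_spec nums nums[l] nums.length (l + 1) [nums[l]] (by omega)]
          simp only [pvOuterA, dif_pos h, if_pos heq, hp]
          rw [ih (l + 1 + m) (res ++ [[nums[l]] ++ List.replicate m nums[l]]) (by omega)]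
          rw [hd, pvCanon, ← hm]
          rw [if_neg (by omega)]
          have hdd : List.drop m (nums.drop (l + 1)) = nums.drop (l + 1 + m) := by
            rw [List.drop_drop]; try rw [Nat.add_comm]
          rw [hdd]
          have haux : [nums[l]] ++ List.replicate m nums[l] = List.replicate (m + 1) nums[l] := by
            simp [List.replicate_succ]
          rw [haux]
          simp
        · simp only [pvOuterA, dif_pos h, if_neg heq]
          rw [ih (l + 1) res (by omega), hd, pvCanon]
          rw [if_pos (by rw [hd1]; simp [pvLead]; exact fun hc => heq hc.symm)]
      · have hl : (nums.drop l).length ≤ 1 := by simp; omega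
        rw [pvLead_nonpos _ hl]
        simp [pvOuterA, h]

-- finishing step of B (the code after the fold), named for the invariant lemma
def pvFinish (st : List (List Int) × Option (Int × Int)) : List (List Int) :=
  match st.2 with
  | some (v, k) => if 2 ≤ k then st.1 ++ [List.replicate k.toNat v] else st.1
  | none => st.1

theorem pvFoldB_spec (rest : List Int) :
    ∀ (res : List (List Int)) (v : Int) (k : Int), 1 ≤ k →
      pvFinish (List.foldl pvStepB (res, some (v, k)) rest)
        = res ++ pvCanon (List.replicate k.toNat v ++ rest) := by
  induction rest with
  | nil =>
      intro res v k hk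
      simp only [List.foldl_nil, pvFinish, List.append_nil]
      rw [pvCanon_replicate]
      have h2 : 2 ≤ k ↔ 2 ≤ k.toNat := by omega
      by_cases h : 2 ≤ k
      · rw [if_pos h, if_pos (h2.mp h)]
      · rw [if_neg h, if_neg (fun hc => h (h2.mpr hc))]
        simp
  | cons x rest ih =>
      intro res v k hk
      rw [List.foldl_cons]
      by_cases hx : x = v
      · have hstep : pvStepB (res, some (v, k)) x = (res, some (v, k + 1)) := by
          simp [pvStepB, hx]
        rw [hstep, ih res v (k + 1) (by omega)]
        congr 2
        have : (k + 1).toNat = k.toNat + 1 := by omega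
        rw [this, List.replicate_succ']
        simp [hx]
      · have hstep : pvStepB (res, some (v, k)) x
            = ((if 2 ≤ k then res ++ [List.replicate k.toNat v] else res), some (x, 1)) := by
          simp [pvStepB, hx]
        rw [hstep, ih _ x 1 (by omega)]
        rw [pvCanon_replicate_append v x k.toNat (rest) hx]
        have h2 : 2 ≤ k ↔ 2 ≤ k.toNat := by omega
        by_cases h : 2 ≤ k
        · rw [if_pos h, if_pos (h2.mp h)]
          simp
        · rw [if_neg h, if_neg (fun hc => h (h2.mpr hc))]
          simp

theorem altB_canon (nums : List Int) : repeatedGroups_two_pointers_alt nums = pvCanon nums := by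
  match nums with
  | [] => simp [repeatedGroups_two_pointers_alt, pvCanon]
  | x :: xs =>
      have : repeatedGroups_two_pointers_alt (x :: xs)
          = pvFinish (List.foldl pvStepB ([], some (x, 1)) xs) := by
        simp [repeatedGroups_two_pointers_alt, List.foldl_cons, pvStepB, pvFinish]
      rw [this, pvFoldB_spec xs [] x 1 (by omega)]
      simp

-- ===== VERDICT (by name: the statement is the Claim_ definition above) =====
theorem repeatedGroups_two_pointers_spec : Claim_equal_repeatedGroups_two_pointers := by
  intro nums _
  unfold Spec_repeatedGroups_two_pointers
  rw [altB_canon]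
  unfold repeatedGroups_two_pointers
  rw [pvOuterA_spec nums nums.length 0 [] (by omega)]
  simp
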